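-- pv_equiv track=rewrite | github.com/tgeorge-engg/basic_ML_algorithms | Trees and Forest/decision-tree-classifier.py | __is_categorical
-- ===== SOURCE A (Python) =====
-- def __is_categorical(data_i, unique_limit=5):
--     if type(data_i[0]) == str or type(data_i[0]) == bool:
--         return True
--     uniques = []
--     for point in data_i:
--         if point not in uniques:
--             uniques.append(point)
--         if len(uniques) > unique_limit:
--             return False
--     return True
-- ===== SOURCE B (Python) =====
-- def __is_categorical(data_i, unique_limit=5):
--     if type(data_i[0]) == str or type(data_i[0]) == bool:
--         return True
--     s = sorted(data_i)
--     distinct = 1 + sum(1 for a, b in zip(s, s[1:]) if a != b)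
--     return distinct <= unique_limit
-- ===== Notes on version B (the rewrite author's own statement) =====
-- stated objective: alternative
-- what changed: Replaces the incremental membership-scan dedup loop with a sort-then-scan: sort the column and count adjacent boundaries (positions where consecutive sorted values differ), so the distinct count is 1 + boundaries, with no membership test or dedup container at all.
import Mathlib
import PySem

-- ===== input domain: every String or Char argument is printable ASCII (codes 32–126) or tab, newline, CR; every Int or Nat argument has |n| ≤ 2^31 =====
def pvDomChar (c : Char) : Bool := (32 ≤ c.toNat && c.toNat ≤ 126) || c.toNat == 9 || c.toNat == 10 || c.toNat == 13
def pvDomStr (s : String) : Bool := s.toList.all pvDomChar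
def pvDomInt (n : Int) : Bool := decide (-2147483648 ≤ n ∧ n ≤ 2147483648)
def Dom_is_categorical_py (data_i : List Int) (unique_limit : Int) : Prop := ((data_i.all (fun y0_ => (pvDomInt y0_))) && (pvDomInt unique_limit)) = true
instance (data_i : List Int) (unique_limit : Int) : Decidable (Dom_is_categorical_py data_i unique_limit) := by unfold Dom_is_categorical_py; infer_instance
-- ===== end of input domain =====

-- B replaces A's incremental membership-scan dedup loop by a sort-then-scan:
-- sort the column and count adjacent boundaries; distinct = 1 + boundaries (alternative algorithm, no dedup container).

-- ===== PORT A =====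
-- A's for-loop with early return: uniques accumulates first occurrences;
-- 'return False' as soon as len(uniques) > unique_limit.
def isCatLoopA (unique_limit : Int) : List Int → List Int → Bool
  | [], _ => true
  | point :: rest, uniques =>
    let u := if uniques.contains point then uniques else uniques ++ [point]
    if unique_limit < (u.length : Int) then false else isCatLoopA unique_limit rest u

def is_categorical_py (data_i : List Int) (unique_limit : Int) : Bool :=
  -- the 'type(...) == str or == bool' guard is always False for an int column; its
  -- first-element access raises IndexError on the empty list — excluded by Pre_.
  isCatLoopA unique_limit data_i []

-- ===== PORT B =====
def is_categorical_py_alt (data_i : List Int) (unique_limit : Int) : Bool :=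
  -- (the type guard's first-element access raises on the empty list — Pre_)
  let s := PySem.List.sorted data_i (fun x => x) false
  -- distinct = 1 + sum(1 for a, b in zip(s, s[1:]) if a != b)
  let distinct : Int :=
    1 + (s.zip s.tail).foldl (fun acc ab => if ab.1 ≠ ab.2 then acc + 1 else acc) 0
  decide (distinct ≤ unique_limit)

-- ===== PRECONDITION & SPEC =====
-- indexing the first element raises IndexError on the empty list in both programs.
def Pre_is_categorical_py (data_i : List Int) (unique_limit : Int) : Prop := data_i ≠ []
instance (data_i : List Int) (unique_limit : Int) : Decidable (Pre_is_categorical_py data_i unique_limit) := by unfold Pre_is_categorical_py; infer_instance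

def pvWitness_is_categorical_py : List Int × Int := ([1, 2, 2, 3], 2)

def Spec_is_categorical_py (data_i : List Int) (unique_limit : Int) (out : Bool) : Prop := out = is_categorical_py_alt data_i unique_limit
instance (data_i : List Int) (unique_limit : Int) (out : Bool) : Decidable (Spec_is_categorical_py data_i unique_limit out) := by unfold Spec_is_categorical_py; infer_instance

-- ===== CLAIM (what is proved, stated in full; the proofs are below) =====
def Claim_equal_is_categorical_py : Prop := ∀ (data_i : List Int) (unique_limit : Int), Dom_is_categorical_py data_i unique_limit → Pre_is_categorical_py data_i unique_limit → Spec_is_categorical_py data_i unique_limit (is_categorical_py data_i unique_limit)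

-- ===== LEMMAS AND PROOFS =====

-- the loop body's update is exactly PySem.Set.add
theorem isCat_upd (s : List Int) (p : Int) :
    (if s.contains p then s else s ++ [p]) = PySem.Set.add s p := rfl

-- folding Set.add never shrinks the accumulator
theorem length_le_foldl_add (l s : List Int) :
    s.length ≤ (l.foldl PySem.Set.add s).length := by
  induction l generalizing s with
  | nil => simp
  | cons p rest ih =>
    refine le_trans ?_ (ih (PySem.Set.add s p))
    by_cases h : p ∈ s <;> simp [PySem.Set.add, List.contains_eq_mem, h]

-- loop invariant: as long as the accumulator fits under the limit, A's loop
-- answers exactly "the final distinct count fits under the limit"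
theorem isCatLoopA_eq (unique_limit : Int) (l s : List Int)
    (hs : (s.length : Int) ≤ unique_limit) :
    isCatLoopA unique_limit l s
      = decide (((l.foldl PySem.Set.add s).length : Int) ≤ unique_limit) := by
  induction l generalizing s with
  | nil => simpa [isCatLoopA] using hs
  | cons p rest ih =>
    rw [isCatLoopA, isCat_upd]
    by_cases h : unique_limit < ((PySem.Set.add s p).length : Int)
    · have := length_le_foldl_add rest (PySem.Set.add s p)
      simp only [h, if_true, List.foldl_cons]
      symm
      simp only [decide_eq_false_iff_not, not_le]
      exact lt_of_lt_of_le h (by exact_mod_cast this)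
    · simp only [h, if_false, List.foldl_cons]
      exact ih _ (le_of_not_gt h)

-- B's generator-sum is a countP of the adjacent pairs
theorem adjFold_eq_countP (pairs : List (Int × Int)) (acc : Int) :
    pairs.foldl (fun acc ab => if ab.1 ≠ ab.2 then acc + 1 else acc) acc
      = acc + (pairs.countP (fun ab => decide (ab.1 ≠ ab.2)) : Int) := by
  induction pairs generalizing acc with
  | nil => simp
  | cons ab rest ih =>
    rw [List.foldl_cons, ih, List.countP_cons]
    by_cases h : ab.1 ≠ ab.2 <;> simp [h] <;> ring

-- on a nonempty ≤-sorted list, 1 + #adjacent boundaries = #distinct elements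
theorem chain_card : ∀ (s : List Int), s.Pairwise (· ≤ ·) → s ≠ [] →
    1 + (s.zip s.tail).countP (fun ab => decide (ab.1 ≠ ab.2)) = s.toFinset.card := by
  intro s
  induction s with
  | nil => intro _ h; exact absurd rfl h
  | cons a t ih =>
    intro hp _
    cases t with
    | nil => simp
    | cons b t' =>
      have hp' : (b :: t').Pairwise (· ≤ ·) := hp.tail
      have hab : a ≤ b := (List.pairwise_cons.mp hp).1 b (by simp)
      have ihv := ih hp' (by simp)
      rw [show (a :: b :: t').zip (a :: b :: t').tail
            = (a, b) :: ((b :: t').zip (b :: t').tail) by simp [List.zip]]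
      rw [List.countP_cons]
      by_cases h : a = b
      · have : a ∈ (b :: t').toFinset := by simp [h]
        simp only [h, decide_eq_true_eq]
        rw [List.toFinset_cons, Finset.insert_eq_self.mpr (by simp [h])]
        simpa [h] using ihv
      · have hnotmem : a ∉ (b :: t')  := by
          intro hm
          have := (List.pairwise_cons.mp hp).1 a hm
          have hlt : a < b := lt_of_le_of_ne hab h
          rcases List.mem_cons.mp hm with rfl | hmt
          · exact h rfl
          · have hbt : b ≤ a := (List.pairwise_cons.mp hp').1 a hmt
            omega
        rw [List.toFinset_cons, Finset.card_insert_of_notMem (by simpa using hnotmem)]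
        simp only [h, decide_eq_true_eq]
        simp only [if_pos h]
        omega

-- the first-occurrence set has as many elements as the list has distinct values
theorem setLen_eq_card (l : List Int) :
    (PySem.Set.ofList l).length = l.toFinset.card := by
  have hnd : (PySem.Set.ofList l).Nodup := PySem.Set.nodup_ofList l
  have hfin : (PySem.Set.ofList l).toFinset = l.toFinset := by
    ext x; simp [List.mem_toFinset, PySem.Set.mem_ofList]
  rw [← List.toFinset_card_of_nodup hnd, hfin]

-- B computes exactly the distinct count compared to the limit
theorem alt_eq_card (data_i : List Int) (unique_limit : Int) (h : data_i ≠ []) :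
    is_categorical_py_alt data_i unique_limit
      = decide ((data_i.toFinset.card : Int) ≤ unique_limit) := by
  unfold is_categorical_py_alt
  dsimp only
  have hs : (PySem.List.sorted data_i (fun x => x) false).Pairwise (· ≤ ·) := by
    simpa using PySem.List.sorted_pairwise data_i (fun x => x)
  have hne : PySem.List.sorted data_i (fun x => x) false ≠ [] := by
    simpa [PySem.List.sorted_eq_nil_iff] using h
  have hcc := chain_card _ hs hne
  have hperm : (PySem.List.sorted data_i (fun x => x) false).Perm data_i :=
    PySem.List.sorted_perm data_i (fun x => x) false
  rw [adjFold_eq_countP]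
  have : (1 : Int) + (0 + ((PySem.List.sorted data_i (fun x => x) false).zip
        (PySem.List.sorted data_i (fun x => x) false).tail).countP
        (fun ab => decide (ab.1 ≠ ab.2)))
      = (data_i.toFinset.card : Int) := by
    rw [← List.toFinset_eq_of_perm _ _ hperm, ← hcc]; push_cast; ring
  rw [this]

-- ===== VERDICT (by name: the statement is the Claim_ definition above) =====
theorem is_categorical_py_spec : Claim_equal_is_categorical_py := by
  intro data_i unique_limit _ hpre
  unfold Spec_is_categorical_py is_categorical_py
  rw [alt_eq_card data_i unique_limit hpre]
  by_cases hlim : (0 : Int) ≤ unique_limit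
  · rw [isCatLoopA_eq unique_limit data_i [] (by simpa using hlim)]
    rw [← PySem.Set.ofList_eq_foldl, setLen_eq_card]
  · -- limit < 0: the loop fails at the first element; the distinct count is positive
    cases data_i with
    | nil => exact absurd rfl hpre
    | cons p rest =>
      have h1 : unique_limit < (((PySem.Set.add [] p)).length : Int) := by
        simp [PySem.Set.add]; omega
      rw [isCatLoopA, isCat_upd]
      simp only [h1, if_true]
      have h2 : 0 < (p :: rest).toFinset.card := by
        refine Finset.card_pos.mpr ⟨p, ?_⟩; simp
      symm
      simp only [decide_eq_false_iff_not, not_le]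
      omega
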